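-- pv_equiv track=rewrite | github.com/AJS-911/Proxima | src/proxima/agent/dynamic_tools/result_processor.py | _looks_like_code
-- ===== SOURCE A (Python) =====
-- def _looks_like_code(text: str) -> bool:
--     """Check if text looks like code."""
--     code_indicators = [
--         "def ", "class ", "import ", "from ",  # Python
--         "function ", "const ", "let ", "var ",  # JavaScript
--         "public ", "private ", "void ", "int ",  # Java/C++
--         "fn ", "let ", "use ", "mod ",  # Rust
--     ]
--     return any(indicator in text for indicator in code_indicators)
-- ===== SOURCE B (Python) =====
-- # keywords grouped by length: at each text position probe one hashed set per length
-- _KEYWORDS_BY_LEN = (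
--     (3, frozenset(("fn ",))),
--     (4, frozenset(("def ", "let ", "var ", "int ", "use ", "mod "))),
--     (5, frozenset(("from ", "void "))),
--     (6, frozenset(("class ", "const "))),
--     (7, frozenset(("import ", "public "))),
--     (8, frozenset(("private ",))),
--     (9, frozenset(("function ",))),
-- )
--
--
-- def _looks_like_code(text: str) -> bool:
--     """Check if text looks like code: single pass over positions, hashed keyword lookup."""
--     return any(text[i:i + n] in kws
--                for i in range(len(text))
--                for n, kws in _KEYWORDS_BY_LEN)
-- ===== Notes on version B (the rewrite author's own statement) =====
-- stated objective: alternative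
-- what changed: Replaces 16 independent substring scans (one per keyword) by a single left-to-right pass over text positions that probes a frozenset of keywords with each of the 7 possible keyword lengths, so the keyword list is traversed zero times per position (hash lookups instead).
import Mathlib
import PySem

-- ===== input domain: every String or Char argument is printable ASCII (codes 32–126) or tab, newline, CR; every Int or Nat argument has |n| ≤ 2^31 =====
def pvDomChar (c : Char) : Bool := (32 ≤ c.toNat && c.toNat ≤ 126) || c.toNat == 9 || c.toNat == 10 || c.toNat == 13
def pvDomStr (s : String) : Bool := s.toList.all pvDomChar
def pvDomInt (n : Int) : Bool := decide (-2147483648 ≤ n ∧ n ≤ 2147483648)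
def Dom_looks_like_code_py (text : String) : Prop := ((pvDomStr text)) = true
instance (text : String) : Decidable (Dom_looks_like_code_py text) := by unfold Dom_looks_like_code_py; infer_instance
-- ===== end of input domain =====

-- B: instead of one substring scan per keyword, a single pass over the positions of the
-- text, probing a per-length keyword set at each position (alternative decomposition).

-- ===== PORT A =====
-- the 16 literals of A, in order (including the duplicate "let ")
def codeIndicators : List String :=
  ["def ", "class ", "import ", "from ",
   "function ", "const ", "let ", "var ",
   "public ", "private ", "void ", "int ",
   "fn ", "let ", "use ", "mod "]

def looks_like_code_py (text : String) : Bool :=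
  codeIndicators.any (fun indicator => PySem.Str.isIn indicator text)

-- ===== PORT B =====
-- _KEYWORDS_BY_LEN of Source B: (length, frozenset of keywords of that length)
def kwByLen : List (Int × PySem.Set (List Char)) :=
  [(3, PySem.Set.ofList ["fn ".toList]),
   (4, PySem.Set.ofList ["def ".toList, "let ".toList, "var ".toList,
                         "int ".toList, "use ".toList, "mod ".toList]),
   (5, PySem.Set.ofList ["from ".toList, "void ".toList]),
   (6, PySem.Set.ofList ["class ".toList, "const ".toList]),
   (7, PySem.Set.ofList ["import ".toList, "public ".toList]),
   (8, PySem.Set.ofList ["private ".toList]),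
   (9, PySem.Set.ofList ["function ".toList])]

def looks_like_code_py_alt (text : String) : Bool :=
  (PySem.List.pyRange 0 (text.toList.length : Int) 1).any (fun i =>
    kwByLen.any (fun p =>
      PySem.Set.contains p.2 (PySem.List.slice text.toList (some i) (some (i + p.1)))))

-- ===== PRECONDITION & SPEC =====
def Spec_looks_like_code_py (text : String) (out : Bool) : Prop := out = looks_like_code_py_alt text
instance (text : String) (out : Bool) : Decidable (Spec_looks_like_code_py text out) := by unfold Spec_looks_like_code_py; infer_instance

-- ===== CLAIM (what is proved, stated in full; the proofs are below) =====
def Claim_equal_looks_like_code_py : Prop := ∀ (text : String), Dom_looks_like_code_py text → Spec_looks_like_code_py text (looks_like_code_py text)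

-- ===== LEMMAS AND PROOFS =====

-- each group of B's table has a nonnegative length, and its keywords are nonempty of exactly that length
lemma kwByLen_facts :
    ∀ p ∈ kwByLen, 0 ≤ p.1 ∧ ∀ kw ∈ p.2, kw ≠ [] ∧ (kw.length : Int) = p.1 := by decide

-- B's position-major double loop hits exactly when some keyword of some group occurs in s
lemma alt_iff (s : List Char) :
    ((PySem.List.pyRange 0 (s.length : Int) 1).any (fun i =>
      kwByLen.any (fun p =>
        PySem.Set.contains p.2 (PySem.List.slice s (some i) (some (i + p.1)))))) = true
      ↔ ∃ p ∈ kwByLen, ∃ kw ∈ p.2, PySem.Chars.isIn kw s = true := by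
  simp only [List.any_eq_true, PySem.List.mem_pyRange_one, PySem.Set.contains_iff]
  constructor
  · rintro ⟨i, ⟨hi0, hilt⟩, p, hp, hmem⟩
    refine ⟨p, hp, _, hmem, ?_⟩
    rw [← PySem.Chars.exists_prefix_drop_iff_isIn]
    have hn0 : (0:Int) ≤ p.1 := (kwByLen_facts p hp).1
    rw [PySem.List.slice_toNat s hi0 (by omega)]
    exact ⟨i.toNat, List.take_prefix _ _⟩
  · rintro ⟨p, hp, kw, hkw, hin⟩
    obtain ⟨hne, hlen⟩ := (kwByLen_facts p hp).2 kw hkw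
    obtain ⟨j, hpre⟩ := (PySem.Chars.exists_prefix_drop_iff_isIn kw s).mpr hin
    have hjlt : j < s.length := by
      by_contra h
      rw [List.drop_eq_nil_of_le (by omega)] at hpre
      exact hne (List.prefix_nil.mp hpre)
    refine ⟨(j : Int), ⟨by positivity, by exact_mod_cast hjlt⟩, p, hp, ?_⟩
    have : PySem.List.slice s (some (j:Int)) (some ((j:Int) + p.1)) = kw := by
      rw [← hlen, PySem.List.slice_natCast_add]
      exact ((List.prefix_iff_eq_take.mp hpre)).symm
    rw [this]; exact hkw

-- A's 16-keyword disjunction equals the disjunction over B's grouped (deduplicated) table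
lemma a_iff (text : String) :
    looks_like_code_py text = true
      ↔ ∃ p ∈ kwByLen, ∃ kw ∈ p.2, PySem.Chars.isIn kw text.toList = true := by
  simp only [looks_like_code_py, codeIndicators, kwByLen, List.any_eq_true,
    List.mem_cons, List.not_mem_nil, or_false, PySem.Str.isIn_eq]
  constructor
  · rintro ⟨ind, hind, h⟩
    rcases hind with rfl|rfl|rfl|rfl|rfl|rfl|rfl|rfl|rfl|rfl|rfl|rfl|rfl|rfl|rfl|rfl <;>
      first
        | exact ⟨_, Or.inl rfl, _, by decide, h⟩
        | exact ⟨_, Or.inr (Or.inl rfl), _, by decide, h⟩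
        | exact ⟨_, Or.inr (Or.inr (Or.inl rfl)), _, by decide, h⟩
        | exact ⟨_, Or.inr (Or.inr (Or.inr (Or.inl rfl))), _, by decide, h⟩
        | exact ⟨_, Or.inr (Or.inr (Or.inr (Or.inr (Or.inl rfl)))), _, by decide, h⟩
        | exact ⟨_, Or.inr (Or.inr (Or.inr (Or.inr (Or.inr (Or.inl rfl))))), _, by decide, h⟩
        | exact ⟨_, Or.inr (Or.inr (Or.inr (Or.inr (Or.inr (Or.inr rfl))))), _, by decide, h⟩
  · rintro ⟨p, hp, kw, hkw, h⟩
    rcases hp with rfl|rfl|rfl|rfl|rfl|rfl|rfl <;>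
      simp only [PySem.Set.mem_ofList, List.mem_cons, List.not_mem_nil, or_false] at hkw <;>
      (try rcases hkw with rfl|rfl|rfl|rfl|rfl|rfl) <;>
      (refine ⟨_, ?_, h⟩; decide)

-- ===== VERDICT (by name: the statement is the Claim_ definition above) =====
theorem looks_like_code_py_spec : Claim_equal_looks_like_code_py := by
  intro text _
  unfold Spec_looks_like_code_py looks_like_code_py_alt
  rw [Bool.eq_iff_iff]
  exact (a_iff text).trans (alt_iff text.toList).symm
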